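-- pv_equiv track=rewrite | github.com/raafay-s/CS-303E | Quiz3D.py | factorsInLine
-- ===== SOURCE A (Python) =====
-- def factorsInLine(values):
--     # write your solution to problem 2 here
--     if not values:
--         return []
--
--     result = []
--     current_sublist = []
--
--     for value in values:
--         # If current_sublist is empty or if the current value is not a multiple of the anchor
--         # (first element in the current sublist), start a new sublist
--         if not current_sublist or value % current_sublist[0] != 0:
--             # If we already have a sublist, add it to the result
--             if current_sublist:
--                 result.append(current_sublist)
--             # Start a new sublist with the current value as the anchor
--             current_sublist = [value]
--         else:
--             # Current value is a multiple of the anchor, add it to the current sublist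
--             current_sublist.append(value)
--
--     # Don't forget to add the last sublist if it exists
--     if current_sublist:
--         result.append(current_sublist)
--
--     return result
--     pass
-- ===== SOURCE B (Python) =====
-- def factorsInLine(values):
--     result = []
--     i = 0
--     n = len(values)
--     while i < n:
--         anchor = values[i]
--         j = i + 1
--         while j < n and values[j] % anchor == 0:
--             j += 1
--         result.append(values[i:j])
--         i = j
--     return result
-- ===== Notes on version B (the rewrite author's own statement) =====
-- stated objective: alternative
-- what changed: B replaces A's accumulator loop (result list plus mutable current_sublist flushed on anchor change) by an index-span decomposition: for each group start it scans the maximal run of multiples of the anchor with an inner loop and emits the group as one slice values[i:j].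
import Mathlib
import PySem

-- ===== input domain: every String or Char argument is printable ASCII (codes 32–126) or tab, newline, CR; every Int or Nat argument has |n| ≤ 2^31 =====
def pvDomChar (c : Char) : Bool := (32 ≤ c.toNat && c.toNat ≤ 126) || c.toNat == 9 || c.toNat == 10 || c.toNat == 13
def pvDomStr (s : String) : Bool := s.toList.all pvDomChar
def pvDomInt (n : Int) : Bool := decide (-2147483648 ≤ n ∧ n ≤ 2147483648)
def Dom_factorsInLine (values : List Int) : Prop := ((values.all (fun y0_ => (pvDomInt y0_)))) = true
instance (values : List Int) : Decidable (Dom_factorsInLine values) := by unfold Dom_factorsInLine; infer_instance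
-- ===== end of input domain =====

-- B replaces A's accumulator loop (flush current_sublist on anchor change) by an index-span decomposition (anchor run found, group emitted as one slice); objective: alternative, same cost.


-- ===== PORT A =====
-- one loop step: state is (result, current_sublist); cur.headD 0 is read only when cur ≠ [] (Python's short-circuit `or`)
def pvAStep (st : List (List Int) × List Int) (value : Int) : List (List Int) × List Int :=
  if st.2.isEmpty || PySem.Int.mod value (st.2.headD 0) != 0 then
    ((if st.2.isEmpty then st.1 else st.1 ++ [st.2]), [value])
  else (st.1, st.2 ++ [value])

def factorsInLine (values : List Int) : List (List Int) :=
  if values.isEmpty then []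
  else
    let st := values.foldl pvAStep ([], [])
    if st.2.isEmpty then st.1 else st.1 ++ [st.2]

-- ===== PORT B =====
-- length of the run of multiples of `anchor` (the inner while loop advancing j)
def pvSpanLen (anchor : Int) : List Int → Nat
  | [] => 0
  | v :: rest => if PySem.Int.mod v anchor = 0 then pvSpanLen anchor rest + 1 else 0

def factorsInLine_alt (values : List Int) : List (List Int) :=
  match values with
  | [] => []
  | a :: rest =>
    let i := pvSpanLen a rest + 1
    ((a :: rest).take i) :: factorsInLine_alt ((a :: rest).drop i)
termination_by values.length
decreasing_by simp

-- ===== PRECONDITION & SPEC =====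
-- Pre_ excludes exactly the inputs where A (and B) raises ZeroDivisionError: a first element 0
-- followed by anything (0 % a == 0 for a ≠ 0, so 0 can be the anchor only as the head).
def Pre_factorsInLine (values : List Int) : Prop := ¬ (values.head? = some 0 ∧ 2 ≤ values.length)
instance (values : List Int) : Decidable (Pre_factorsInLine values) := by unfold Pre_factorsInLine; infer_instance
def pvWitness_factorsInLine : List Int := [3, 6, 9, 4, 8, 0, 5]
def Spec_factorsInLine (values : List Int) (out : List (List Int)) : Prop := out = factorsInLine_alt values
instance (values : List Int) (out : List (List Int)) : Decidable (Spec_factorsInLine values out) := by unfold Spec_factorsInLine; infer_instance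

-- ===== CLAIM (what is proved, stated in full; the proofs are below) =====
def Claim_equal_factorsInLine : Prop := ∀ (values : List Int), Dom_factorsInLine values → Pre_factorsInLine values → Spec_factorsInLine values (factorsInLine values)

-- ===== LEMMAS AND PROOFS =====

def pvMult (a v : Int) : Bool := PySem.Int.mod v a = 0

lemma pvMod_zero_left (a : Int) : PySem.Int.mod 0 a = 0 := by
  have := PySem.Int.mod_eq_zero_iff_dvd 0 a
  simp at this; exact this

-- B's span take/drop equal takeWhile/dropWhile of multiples
lemma pvSpan_take (a : Int) (xs : List Int) :
    xs.take (pvSpanLen a xs) = xs.takeWhile (pvMult a) ∧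
    xs.drop (pvSpanLen a xs) = xs.dropWhile (pvMult a) := by
  induction xs with
  | nil => simp [pvSpanLen]
  | cons v rest ih =>
    by_cases h : PySem.Int.mod v a = 0
    · simp [pvSpanLen, h, pvMult, ih.1, ih.2]
    · simp [pvSpanLen, h, pvMult]

lemma pvAlt_cons (a : Int) (rest : List Int) :
    factorsInLine_alt (a :: rest) =
      (a :: rest.takeWhile (pvMult a)) :: factorsInLine_alt (rest.dropWhile (pvMult a)) := by
  rw [factorsInLine_alt.eq_2]
  simp [List.take_succ_cons, List.drop_succ_cons, (pvSpan_take a rest).1, (pvSpan_take a rest).2]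

def pvFinish (st : List (List Int) × List Int) : List (List Int) :=
  if st.2.isEmpty then st.1 else st.1 ++ [st.2]

-- main invariant: running A's loop with a nonempty current sublist (nonzero anchor) produces,
-- after the final flush, exactly B's decomposition of the remaining input appended to result
lemma pvLoop_eq (xs : List Int) : ∀ (res : List (List Int)) (c0 : Int) (cs : List Int), c0 ≠ 0 →
    pvFinish (xs.foldl pvAStep (res, c0 :: cs)) =
      res ++ ((c0 :: (cs ++ xs.takeWhile (pvMult c0))) :: factorsInLine_alt (xs.dropWhile (pvMult c0))) := by
  induction xs with
  | nil => intro res c0 cs h; simp [pvFinish, factorsInLine_alt.eq_1]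
  | cons v xs' ih =>
    intro res c0 cs h
    by_cases hm : PySem.Int.mod v c0 = 0
    · have hstep : pvAStep (res, c0 :: cs) v = (res, c0 :: (cs ++ [v])) := by
        simp [pvAStep, hm]
      rw [List.foldl_cons, hstep, ih res c0 (cs ++ [v]) h]
      simp [pvMult, hm]
    · have hv : v ≠ 0 := by
        intro hv0; exact hm (by rw [hv0]; exact pvMod_zero_left c0)
      have hstep : pvAStep (res, c0 :: cs) v = (res ++ [c0 :: cs], [v]) := by
        simp [pvAStep, hm]
      rw [List.foldl_cons, hstep, ih (res ++ [c0 :: cs]) v [] hv]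
      simp [pvMult, hm, pvAlt_cons]

-- ===== VERDICT (by name: the statement is the Claim_ definition above) =====
theorem factorsInLine_spec : Claim_equal_factorsInLine := by
  intro values _ hpre
  unfold Spec_factorsInLine
  match values with
  | [] => simp [factorsInLine, factorsInLine_alt.eq_1]
  | [a] =>
    simp [factorsInLine, factorsInLine_alt.eq_2, pvAStep, pvSpanLen, factorsInLine_alt.eq_1]
  | a :: b :: rest =>
    have ha : a ≠ 0 := by
      intro h0
      exact hpre ⟨by simp [h0], by simp⟩
    simp only [factorsInLine, List.isEmpty_cons, List.foldl_cons]
    have h1 : pvAStep ([], []) a = ([], [a]) := by simp [pvAStep]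
    rw [h1]
    have hmain := pvLoop_eq (b :: rest) [] a [] ha
    simp only [pvFinish] at hmain
    rw [List.foldl_cons] at hmain
    rw [hmain, pvAlt_cons]
    simp
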